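-- pv_equiv track=rewrite | github.com/Cartman-SP/Solana | backend/flip2/pumpfun.py | complete_was_successful
-- ===== SOURCE A (Python) =====
-- PUMP_FUN = "6EF8rrecthR5Dkzon8Nwu78hRvfCKubJ14M5uBEwF6P"
--
-- def _low_logs(logs):
--     return [str(l).lower() for l in (logs or [])]
--
-- def complete_was_successful(logs: list[str]) -> bool:
--     low = _low_logs(logs)
--     tgt = f"program {PUMP_FUN.lower()}"
--     saw_complete = False
--     for l in low:
--         if "instruction" in l and "complete" in l:
--             saw_complete = True
--         if saw_complete and (tgt in l) and (" success" in l):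
--             return True
--     return False
-- ===== SOURCE B (Python) =====
-- PUMP_FUN = "6EF8rrecthR5Dkzon8Nwu78hRvfCKubJ14M5uBEwF6P"
--
-- def complete_was_successful(logs: list[str]) -> bool:
--     # Index-set formulation: the answer is True iff some success line occurs at
--     # or after some complete-instruction line, i.e. iff the FIRST marker index
--     # is <= the LAST success index.  No latch, no positional scan-from-marker:
--     # two independent event-index extractions and one arithmetic comparison.
--     low = [str(l).lower() for l in (logs or [])]
--     tgt = f"program {PUMP_FUN.lower()}"
--     marker_at = [i for i, l in enumerate(low) if "instruction" in l and "complete" in l]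
--     success_at = [i for i, l in enumerate(low) if tgt in l and " success" in l]
--     return bool(marker_at) and bool(success_at) and min(marker_at) <= max(success_at)
-- ===== Notes on version B (the rewrite author's own statement) =====
-- stated objective: alternative
-- what changed: Replaces the latch-flag sequential scan with an order-theoretic reformulation: extract the index sets of marker lines and of success lines independently, then answer by comparing the minimum marker index with the maximum success index (min(marker_at) <= max(success_at)), which is equivalent to 'some success line occurs at or after some marker line'.
import Mathlib
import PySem

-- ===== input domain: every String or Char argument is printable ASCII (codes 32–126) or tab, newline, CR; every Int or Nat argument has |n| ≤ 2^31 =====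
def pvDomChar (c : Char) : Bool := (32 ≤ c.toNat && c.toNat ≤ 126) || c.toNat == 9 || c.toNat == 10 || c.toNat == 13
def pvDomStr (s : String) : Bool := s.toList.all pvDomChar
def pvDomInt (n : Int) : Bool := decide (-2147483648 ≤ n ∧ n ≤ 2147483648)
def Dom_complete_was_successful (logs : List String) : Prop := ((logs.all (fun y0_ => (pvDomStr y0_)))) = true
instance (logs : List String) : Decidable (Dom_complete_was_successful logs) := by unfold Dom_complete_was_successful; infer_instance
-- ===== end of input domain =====

-- B replaces the latch-flag scan by extracting marker/success index sets and comparing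
-- min(marker indices) with max(success indices); same cost, different algorithm.

-- ===== PORT A =====
def PUMP_FUN : String := "6EF8rrecthR5Dkzon8Nwu78hRvfCKubJ14M5uBEwF6P"

def cwsLoopA (tgt : String) : List String → Bool → Bool
  | [], _ => false
  | l :: rest, saw =>
    let saw' := if PySem.Str.isIn "instruction" l && PySem.Str.isIn "complete" l then true else saw
    if saw' && PySem.Str.isIn tgt l && PySem.Str.isIn " success" l then true
    else cwsLoopA tgt rest saw'

def complete_was_successful (logs : List String) : Bool :=
  let low := logs.map PySem.Str.lower
  let tgt := "program " ++ PySem.Str.lower PUMP_FUN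
  cwsLoopA tgt low false

-- ===== PORT B =====
def cwsMarker (l : String) : Bool :=
  PySem.Str.isIn "instruction" l && PySem.Str.isIn "complete" l

def cwsSuccess (tgt l : String) : Bool :=
  PySem.Str.isIn tgt l && PySem.Str.isIn " success" l

def complete_was_successful_alt (logs : List String) : Bool :=
  let low := logs.map PySem.Str.lower
  let tgt := "program " ++ PySem.Str.lower PUMP_FUN
  let marker_at := (PySem.List.enumerate low).filterMap
    (fun p => if cwsMarker p.2 then some p.1 else none)
  let success_at := (PySem.List.enumerate low).filterMap
    (fun p => if cwsSuccess tgt p.2 then some p.1 else none)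
  -- bool(marker_at) and bool(success_at) and min(marker_at) <= max(success_at)
  match PySem.List.min? marker_at (fun x => x), PySem.List.max? success_at (fun x => x) with
  | some a, some b => decide (a ≤ b)
  | _, _ => false

-- ===== PRECONDITION & SPEC =====
def Spec_complete_was_successful (logs : List String) (out : Bool) : Prop := out = complete_was_successful_alt logs
instance (logs : List String) (out : Bool) : Decidable (Spec_complete_was_successful logs out) := by unfold Spec_complete_was_successful; infer_instance

-- ===== CLAIM (what is proved, stated in full; the proofs are below) =====
def Claim_equal_complete_was_successful : Prop := ∀ (logs : List String), Dom_complete_was_successful logs → Spec_complete_was_successful logs (complete_was_successful logs)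

-- ===== LEMMAS AND PROOFS =====

-- shared characterization: some marker line occurs at index i ≤ j where a success line occurs
def cwsSpec (tgt : String) (low : List String) : Prop :=
  ∃ (i j : Nat) (hi : i < low.length) (hj : j < low.length),
    i ≤ j ∧ cwsMarker low[i] = true ∧ cwsSuccess tgt low[j] = true

lemma cwsLoopA_true (tgt : String) (low : List String) :
    cwsLoopA tgt low true = low.any (fun l => cwsSuccess tgt l) := by
  induction low with
  | nil => rfl
  | cons l rest ih =>
    simp only [cwsLoopA, List.any_cons, cwsSuccess] at *
    split_ifs with h1 h2 h2 <;> simp_all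

lemma cwsLoopA_false_iff (tgt : String) (low : List String) :
    cwsLoopA tgt low false = true ↔ cwsSpec tgt low := by
  induction low with
  | nil => simp [cwsLoopA, cwsSpec]
  | cons l rest ih =>
    simp only [cwsLoopA]
    by_cases hm : cwsMarker l = true
    · have hm' : (PySem.Str.isIn "instruction" l && PySem.Str.isIn "complete" l) = true := hm
      simp only [hm', if_true, Bool.true_and, cwsLoopA_true]
      constructor
      · intro h
        by_cases hs : cwsSuccess tgt l = true
        · exact ⟨0, 0, by simp, by simp, le_refl _, by simpa using hm, by simpa using hs⟩
        · have hs' : (PySem.Str.isIn tgt l && PySem.Str.isIn " success" l) = false := by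
            simpa [cwsSuccess] using (Bool.eq_false_iff.mpr hs)
          rw [hs'] at h
          simp only [Bool.false_eq_true, if_false] at h
          rcases List.any_eq_true.mp h with ⟨x, hx, hpx⟩
          rcases List.mem_iff_getElem.mp hx with ⟨k, hk, rfl⟩
          exact ⟨0, k + 1, by simp, by simpa using Nat.succ_lt_succ hk,
            Nat.zero_le _, by simpa using hm, by simpa using hpx⟩
      · rintro ⟨i, j, hi, hj, hij, hmi, hsj⟩
        by_cases hs : (PySem.Str.isIn tgt l && PySem.Str.isIn " success" l) = true
        · rw [if_pos hs]
        · rw [Bool.eq_false_iff.mpr hs]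
          simp only [Bool.false_eq_true, if_false]
          apply List.any_eq_true.mpr
          cases j with
          | zero =>
            exact absurd hsj (by simpa [cwsSuccess] using Bool.eq_false_iff.mpr hs)
          | succ j' =>
            have hj' : j' < rest.length := by simpa using hj
            exact ⟨rest[j'], List.getElem_mem _, by simpa using hsj⟩
    · have hm' : (PySem.Str.isIn "instruction" l && PySem.Str.isIn "complete" l) = false := by
        simpa [cwsMarker] using (Bool.eq_false_iff.mpr hm)
      simp only [hm', if_false, Bool.false_and, Bool.false_eq_true]
      rw [ih]
      constructor
      · rintro ⟨i, j, hi, hj, hij, hmi, hsj⟩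
        exact ⟨i + 1, j + 1, by simpa using Nat.succ_lt_succ hi,
          by simpa using Nat.succ_lt_succ hj, Nat.succ_le_succ hij,
          by simpa using hmi, by simpa using hsj⟩
      · rintro ⟨i, j, hi, hj, hij, hmi, hsj⟩
        cases i with
        | zero => exact absurd hmi (by simpa using hm)
        | succ i' =>
          cases j with
          | zero => omega
          | succ j' =>
            exact ⟨i', j', by simpa using hi, by simpa using hj,
              Nat.le_of_succ_le_succ hij, by simpa using hmi, by simpa using hsj⟩

lemma cws_mem_filterMap {p : String → Bool} {low : List String} {x : Int} :
    x ∈ (PySem.List.enumerate low).filterMap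
        (fun q => if p q.2 then some q.1 else none) ↔
      ∃ (k : Nat) (hk : k < low.length), x = (k : Int) ∧ p low[k] = true := by
  simp only [List.mem_filterMap]
  constructor
  · rintro ⟨q, hq, hif⟩
    rcases (PySem.List.mem_enumerate_iff low 0 q).mp hq with ⟨k, hk, rfl⟩
    by_cases hp : p low[k] = true
    · refine ⟨k, hk, ?_, hp⟩
      simp [hp] at hif
      omega
    · simp [Bool.eq_false_iff.mpr hp] at hif
  · rintro ⟨k, hk, rfl, hp⟩
    exact ⟨((k : Int), low[k]),
      (PySem.List.mem_enumerate_iff low 0 _).mpr ⟨k, hk, by simp⟩, by simp [hp]⟩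

lemma cwsAlt_iff (logs : List String) :
    complete_was_successful_alt logs = true ↔
      cwsSpec ("program " ++ PySem.Str.lower PUMP_FUN) (logs.map PySem.Str.lower) := by
  show (match
      PySem.List.min? ((PySem.List.enumerate (logs.map PySem.Str.lower)).filterMap
        (fun p => if cwsMarker p.2 then some p.1 else none)) (fun x => x),
      PySem.List.max? ((PySem.List.enumerate (logs.map PySem.Str.lower)).filterMap
        (fun p => if cwsSuccess ("program " ++ PySem.Str.lower PUMP_FUN) p.2 then some p.1 else none)) (fun x => x) with
    | some a, some b => decide (a ≤ b)
    | _, _ => false) = true ↔ _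
  rcases ha : PySem.List.min? ((PySem.List.enumerate (logs.map PySem.Str.lower)).filterMap
      (fun p => if cwsMarker p.2 then some p.1 else none)) (fun x => x) with _ | a
  · rw [ha]
    have hempty := (PySem.List.min?_eq_none_iff _ _).mp ha
    show false = true ↔ _
    simp only [Bool.false_eq_true, false_iff]
    rintro ⟨i, j, hi, hj, hij, hmi, hsj⟩
    have := cws_mem_filterMap.mpr ⟨i, hi, rfl, hmi⟩
    rw [hempty] at this
    simp at this
  · rcases hb : PySem.List.max? ((PySem.List.enumerate (logs.map PySem.Str.lower)).filterMap
        (fun p => if cwsSuccess ("program " ++ PySem.Str.lower PUMP_FUN) p.2 then some p.1 else none)) (fun x => x) with _ | b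
    · rw [ha, hb]
      have hempty := (PySem.List.max?_eq_none_iff _ _).mp hb
      show false = true ↔ _
      simp only [Bool.false_eq_true, false_iff]
      rintro ⟨i, j, hi, hj, hij, hmi, hsj⟩
      have := cws_mem_filterMap.mpr ⟨j, hj, rfl, hsj⟩
      rw [hempty] at this
      simp at this
    · rw [ha, hb]
      show decide (a ≤ b) = true ↔ _
      simp only [decide_eq_true_eq]
      constructor
      · intro h
        rcases cws_mem_filterMap.mp (PySem.List.min?_mem ha) with ⟨i, hi, rfl, hmi⟩
        rcases cws_mem_filterMap.mp (PySem.List.max?_mem hb) with ⟨j, hj, rfl, hsj⟩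
        exact ⟨i, j, hi, hj, by exact_mod_cast h, hmi, hsj⟩
      · rintro ⟨i, j, hi, hj, hij, hmi, hsj⟩
        have h1 : a ≤ (i : Int) :=
          PySem.List.min?_isMin ha _ (cws_mem_filterMap.mpr ⟨i, hi, rfl, hmi⟩)
        have h2 : (j : Int) ≤ b :=
          PySem.List.max?_isMax hb _ (cws_mem_filterMap.mpr ⟨j, hj, rfl, hsj⟩)
        exact le_trans h1 (le_trans (by exact_mod_cast hij) h2)

-- ===== VERDICT (by name: the statement is the Claim_ definition above) =====
theorem complete_was_successful_spec : Claim_equal_complete_was_successful := by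
  intro logs _
  unfold Spec_complete_was_successful
  rcases hb : complete_was_successful_alt logs with _ | _
  · rcases ha : complete_was_successful logs with _ | _
    · rfl
    · exfalso
      have := (cwsLoopA_false_iff _ _).mp (by simpa [complete_was_successful] using ha)
      exact absurd ((cwsAlt_iff logs).mpr this) (by simp [hb])
  · have := (cwsAlt_iff logs).mp hb
    simpa [complete_was_successful] using (cwsLoopA_false_iff _ _).mpr this
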